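-- pv_equiv track=rewrite | github.com/tuliomitico/organization_information_retrieval | TP03/Ex3/utils.py | tf_query
-- ===== SOURCE A (Python) =====
-- def tf_query(vocab,query):
--     tf_dict = {}
--     for word in vocab:
--         tf_dict[word] = 0
--     for w in query:
--         if w in vocab:
--             tf_dict[w] += 1
--     return tf_dict
-- ===== SOURCE B (Python) =====
-- def tf_query(vocab, query):
--     return {w: query.count(w) for w in vocab}
-- ===== Notes on version B (the rewrite author's own statement) =====
-- stated objective: simpler
-- what changed: B is a one-line dict comprehension driven by vocab that computes query.count(w) per vocab word, replacing A's two staged passes (zero-init over vocab, then per-query-word membership test and increment) with no mutable counter at all.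
import Mathlib
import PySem

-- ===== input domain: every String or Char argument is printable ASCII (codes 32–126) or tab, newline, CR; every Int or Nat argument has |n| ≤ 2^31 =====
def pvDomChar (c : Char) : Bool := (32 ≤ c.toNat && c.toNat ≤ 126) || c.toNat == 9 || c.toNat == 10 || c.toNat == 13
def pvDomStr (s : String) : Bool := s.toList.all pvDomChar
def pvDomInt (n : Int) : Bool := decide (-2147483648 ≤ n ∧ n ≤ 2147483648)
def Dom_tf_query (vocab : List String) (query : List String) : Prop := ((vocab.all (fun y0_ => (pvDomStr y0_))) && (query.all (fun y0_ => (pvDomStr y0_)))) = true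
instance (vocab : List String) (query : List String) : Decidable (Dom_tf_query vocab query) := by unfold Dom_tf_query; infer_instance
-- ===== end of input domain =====

-- B replaces A's two mutating passes (zero-init, then guarded increments over query) by a
-- single dict comprehension over vocab computing query.count(w) per word (simpler, not faster).

-- ===== PORT A =====
def tf_query (vocab : List String) (query : List String) : List (String × Int) :=
  let tf0 : PySem.Dict String Int := vocab.foldl (fun d word => d.insert word 0) PySem.Dict.empty
  let tf := query.foldl (fun d w => if w ∈ vocab then d.modify w 0 (· + 1) else d) tf0
  tf.items

-- ===== PORT B =====
def tf_query_alt (vocab : List String) (query : List String) : List (String × Int) :=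
  (vocab.foldl (fun d w => d.insert w ((PySem.List.count query w : Int))) PySem.Dict.empty).items

-- ===== PRECONDITION & SPEC =====
def Spec_tf_query (vocab : List String) (query : List String) (out : List (String × Int)) : Prop := out = tf_query_alt vocab query
instance (vocab : List String) (query : List String) (out : List (String × Int)) : Decidable (Spec_tf_query vocab query out) := by unfold Spec_tf_query; infer_instance

-- ===== CLAIM (what is proved, stated in full; the proofs are below) =====
def Claim_equal_tf_query : Prop := ∀ (vocab : List String) (query : List String), Dom_tf_query vocab query → Spec_tf_query vocab query (tf_query vocab query)

-- ===== LEMMAS AND PROOFS =====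

-- getD of an insert loop whose value depends only on the key
theorem getD_foldl_insert_fun (l : List String) (f : String → Int) (k : String) :
    ∀ (d : PySem.Dict String Int),
      (l.foldl (fun d w => d.insert w (f w)) d).getD k 0 = if k ∈ l then f k else d.getD k 0 := by
  induction l with
  | nil => intro d; simp
  | cons w l ih =>
    intro d
    simp only [List.foldl_cons, ih, PySem.Dict.getD_insert]
    by_cases hw : k = w
    · by_cases hl : k ∈ l <;> simp [hw]
    · by_cases hl : k ∈ l <;> simp [hw, hl, List.mem_cons]

-- getD through A's guarded modify loop
theorem getD_loopA (vocab : List String) (k : String) :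
    ∀ (q : List String) (d : PySem.Dict String Int),
      (q.foldl (fun d w => if w ∈ vocab then d.modify w 0 (· + 1) else d) d).getD k 0
        = d.getD k 0 + (if k ∈ vocab then (q.count k : Int) else 0) := by
  intro q
  induction q with
  | nil => intro d; simp
  | cons w q ih =>
    intro d
    simp only [List.foldl_cons]
    by_cases hv : w ∈ vocab
    · simp only [hv, if_true, ih, PySem.Dict.getD_modify]
      by_cases hk : k = w
      · subst hk; simp [hv]; ring
      · simp [hk, Ne.symm hk]
    · simp only [hv, if_false, ih]
      by_cases hk : k = w
      · subst hk; simp [hv]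
      · simp [Ne.symm hk]

-- A's guarded modify loop never changes the key list (all touched keys are already present)
theorem keys_loopA (vocab : List String) :
    ∀ (q : List String) (d : PySem.Dict String Int), (∀ w ∈ vocab, d.contains w = true) →
      (q.foldl (fun d w => if w ∈ vocab then d.modify w 0 (· + 1) else d) d).keys = d.keys := by
  intro q
  induction q with
  | nil => intro d _; rfl
  | cons w q ih =>
    intro d hd
    simp only [List.foldl_cons]
    by_cases hv : w ∈ vocab
    · have hc : d.contains w = true := hd w hv
      have hkeys : (d.modify w 0 (· + 1)).keys = d.keys := by
        simp [PySem.Dict.keys_modify, PySem.Dict.keys_insert_of_contains, hc]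
      rw [if_pos hv, ih _ (fun x hx => by
        rw [PySem.Dict.contains_modify]
        simp [hd x hx]), hkeys]
    · rw [if_neg hv, ih _ hd]

-- a dict with distinct keys is its key list paired with the stored values
theorem items_eq_map_keys (d : PySem.Dict String Int) (h : d.keys.Nodup) :
    d.items = d.keys.map (fun k => (k, d.getD k 0)) := by
  have hk : d.keys = d.items.map (·.1) := rfl
  rw [hk, List.map_map]
  have : ∀ p ∈ d.items, ((fun k => (k, d.getD k 0)) ∘ (·.1)) p = id p := by
    intro p hp
    obtain ⟨k, v⟩ := p
    have : d.getD k 0 = v := PySem.Dict.getD_of_mem_items d hp h 0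
    simp [this]
  rw [List.map_congr_left this, List.map_id]

-- ===== VERDICT (by name: the statement is the Claim_ definition above) =====
theorem tf_query_spec : Claim_equal_tf_query := by
  intro vocab query _
  unfold Spec_tf_query tf_query tf_query_alt
  set d0 : PySem.Dict String Int := vocab.foldl (fun d word => d.insert word 0) PySem.Dict.empty with hd0
  set dB : PySem.Dict String Int := vocab.foldl (fun d w => d.insert w ((PySem.List.count query w : Int))) PySem.Dict.empty with hdB
  set dA : PySem.Dict String Int := query.foldl (fun d w => if w ∈ vocab then d.modify w 0 (· + 1) else d) d0 with hdA
  have hkeys0 : d0.keys = PySem.Set.ofList vocab := by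
    rw [hd0, PySem.Dict.keys_foldl_insert]; rfl
  have hkeysB : dB.keys = PySem.Set.ofList vocab := by
    rw [hdB, PySem.Dict.keys_foldl_insert]; rfl
  have hkeysA : dA.keys = PySem.Set.ofList vocab := by
    rw [hdA, keys_loopA vocab query d0 (fun w hw => by
      rw [PySem.Dict.contains_iff_mem_keys, hkeys0]
      exact (PySem.Set.mem_ofList _ _).2 hw), hkeys0]
  have hnodup : (PySem.Set.ofList vocab).Nodup := PySem.Set.nodup_ofList vocab
  have hgetD : ∀ k ∈ vocab, dA.getD k 0 = dB.getD k 0 := by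
    intro k hk
    have hA : dA.getD k 0 = (query.count k : Int) := by
      rw [hdA, getD_loopA, hd0, getD_foldl_insert_fun]
      simp [hk]
    have hB : dB.getD k 0 = (query.count k : Int) := by
      rw [hdB, getD_foldl_insert_fun]
      simp [hk, PySem.List.count]
    rw [hA, hB]
  rw [items_eq_map_keys dA (hkeysA ▸ hnodup), items_eq_map_keys dB (hkeysB ▸ hnodup),
      hkeysA, hkeysB]
  exact List.map_congr_left (fun k hkm => by
    have : k ∈ vocab := (PySem.Set.mem_ofList _ _).1 hkm
    simp [hgetD k this])
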